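-- pv_equiv track=rewrite | github.com/skalyaanamoorthy/PoseFilter | Olig.py | ListtoLig
-- ===== SOURCE A (Python) =====
-- def ListtoLig(all_files):
--     # Check the files for duplicates
--
--     ListofDup = []
--     for item in all_files:
--         res = ''.join([i for i in item if not i.isdigit()])
--         if ListofDup is None:
--             # add element and num
--
--             # add to list of duplicates
--             ListofDup.append([res, 0, [item]])
--
--         else:
--             # Check each item
--             d_count = 0
--             added_item = 0
--             for y in ListofDup:
--                 if y[0] == res:
--                     # Add one to that entry
--                     ListofDup[d_count][1] = y[1] + 1
--                     ListofDup[d_count][2].append(item)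
--                     added_item = 1
--                 d_count += 1
--
--             if added_item == 0:
--                 # add entry to listofdup
--                 ListofDup.append([res, 0, [item]])
--
--     max_item = ""
--     max_num = 0
--     max_dup = 0
--     # Go through each of the items from the list and
--     dup_index = 0
--
--     for dup in ListofDup:
--         if dup[1] > max_num:
--             max_item = dup[0]
--             max_num = dup[1]
--             max_dup = dup_index
--         dup_index += 1
--
--     # returns a list of the ligands, including their extension
--     return(ListofDup[max_dup][2])
-- ===== SOURCE B (Python) =====
-- def ListtoLig(all_files):
--     # Count how many files share each digit-stripped residue name, pick the
--     # best name, then rebuild its group with one filter pass over the input.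
--     counts = {}
--     for f in all_files:
--         res = ''.join(c for c in f if not c.isdigit())
--         counts[res] = counts.get(res, 0) + 1
--     best = max(counts, key=counts.get)
--     return [f for f in all_files if ''.join(c for c in f if not c.isdigit()) == best]
-- ===== Notes on version B (the rewrite author's own statement) =====
-- stated objective: faster
-- what changed: B never builds per-group lists or scans a group list per item: it counts occurrences per digit-stripped key in a dict, selects the best key with max(counts, key=counts.get) (same first-maximal tie-break), and reconstructs the winning group by a single filter pass over the input, replacing A's quadratic inner scan and index-tracking maximum.
import Mathlib
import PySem

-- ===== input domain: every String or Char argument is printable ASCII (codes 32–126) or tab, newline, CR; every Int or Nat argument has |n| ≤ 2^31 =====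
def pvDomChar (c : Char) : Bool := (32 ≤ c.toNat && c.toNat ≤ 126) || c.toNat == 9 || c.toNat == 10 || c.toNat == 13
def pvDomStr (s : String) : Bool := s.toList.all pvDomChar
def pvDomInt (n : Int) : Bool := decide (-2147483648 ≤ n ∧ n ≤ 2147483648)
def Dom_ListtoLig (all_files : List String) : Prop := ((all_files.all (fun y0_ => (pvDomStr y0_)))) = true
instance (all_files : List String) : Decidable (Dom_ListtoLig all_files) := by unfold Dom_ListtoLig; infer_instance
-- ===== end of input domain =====

-- B keeps only a count per digit-stripped name (no per-group lists, no inner scan over the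
-- group list), selects the best name with max(counts, key=counts.get) (same first-maximal
-- tie-break) and reconstructs the winning group by one filter pass (objective: faster).

-- ===== PORT A =====
-- res = ''.join([i for i in item if not i.isdigit()])  (exact on any input: Char-wise filter)
def pvStrip (item : String) : String :=
  String.ofList (item.toList.filter (fun c => !PySem.Chars.isdigit c))

-- body of A's inner 'for y in ListofDup' loop, state = (rebuilt list, added_item flag)
def pvAEntryStep (res item : String) (st : List (String × Int × List String) × Int)
    (y : String × Int × List String) : List (String × Int × List String) × Int :=
  if y.1 == res then (st.1 ++ [(y.1, y.2.1 + 1, y.2.2 ++ [item])], 1) else (st.1 ++ [y], st.2)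

-- one iteration of A's outer loop over all_files
def pvAStep (lod : List (String × Int × List String)) (item : String) :
    List (String × Int × List String) :=
  let res := pvStrip item
  let st := lod.foldl (pvAEntryStep res item) ([], 0)
  if st.2 == 0 then st.1 ++ [(res, 0, [item])] else st.1

-- A's final scan, state = (max_item, max_num, max_dup, dup_index)
def pvASel (s : String × Int × Int × Int) (dup : String × Int × List String) :
    String × Int × Int × Int :=
  if dup.2.1 > s.2.1 then (dup.1, dup.2.1, s.2.2.2, s.2.2.2 + 1)
  else (s.1, s.2.1, s.2.2.1, s.2.2.2 + 1)

def ListtoLig (all_files : List String) : List String :=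
  let lod := all_files.foldl pvAStep []
  let st := lod.foldl pvASel ("", 0, 0, 0)
  ((PySem.List.pyGet? lod st.2.2.1).map (fun e => e.2.2)).getD []

-- ===== PORT B =====
-- counts[res] = counts.get(res, 0) + 1
def pvCntStep (d : PySem.Dict String Int) (f : String) : PySem.Dict String Int :=
  let res := pvStrip f
  d.insert res (d.getD res 0 + 1)

-- best = max(counts, key=counts.get); return [f for f in all_files if strip(f) == best]
def ListtoLig_alt (all_files : List String) : List String :=
  let counts := all_files.foldl pvCntStep PySem.Dict.empty
  match PySem.List.max? counts.keys (fun k => counts.getD k 0) with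
  | some best => all_files.filter (fun f => pvStrip f == best)
  | none => []

-- ===== PRECONDITION & SPEC =====
-- A raises IndexError on the empty list (ListofDup[0] on an empty ListofDup); B raises ValueError (max of an empty dict) there too.
def Pre_ListtoLig (all_files : List String) : Prop := all_files ≠ []
instance (all_files : List String) : Decidable (Pre_ListtoLig all_files) := by
  unfold Pre_ListtoLig; infer_instance

def pvWitness_ListtoLig : List String := ["lig1.pdb", "lig2.pdb", "abc.pdb"]

def Spec_ListtoLig (all_files : List String) (out : List String) : Prop := out = ListtoLig_alt all_files
instance (all_files : List String) (out : List String) : Decidable (Spec_ListtoLig all_files out) := by unfold Spec_ListtoLig; infer_instance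

-- ===== CLAIM (what is proved, stated in full; the proofs are below) =====
def Claim_equal_ListtoLig : Prop := ∀ (all_files : List String), Dom_ListtoLig all_files → Pre_ListtoLig all_files → Spec_ListtoLig all_files (ListtoLig all_files)

-- ===== LEMMAS AND PROOFS =====

-- the canonical shape of A's ListofDup: one entry per distinct stripped key (first-occurrence
-- order), count = #occurrences - 1, items = the filter of the input by that key
def pvF (xs : List String) (k : String) : String × Int × List String :=
  (k, ((xs.map pvStrip).count k : Int) - 1, xs.filter (fun g => pvStrip g == k))

def pvLodSpec (xs : List String) : List (String × Int × List String) :=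
  (PySem.Set.ofList (xs.map pvStrip)).map (pvF xs)

lemma pvA_inner (res item : String) (l : List (String × Int × List String))
    (acc : List (String × Int × List String)) (fl : Int) :
    l.foldl (pvAEntryStep res item) (acc, fl) =
    (acc ++ l.map (fun y => if y.1 == res then (y.1, y.2.1 + 1, y.2.2 ++ [item]) else y),
     if l.any (fun y => y.1 == res) then 1 else fl) := by
  induction l generalizing acc fl with
  | nil => simp
  | cons y t ih =>
    rw [List.foldl_cons]
    by_cases h : (y.1 == res) = true
    · have hstep : pvAEntryStep res item (acc, fl) y
          = (acc ++ [(y.1, y.2.1 + 1, y.2.2 ++ [item])], 1) := by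
        simp [pvAEntryStep, h]
      rw [hstep, ih]
      refine Prod.ext ?_ ?_
      · rw [List.map_cons, if_pos h]
        simp [List.append_assoc]
      · show (if (t.any fun y => y.1 == res) = true then (1 : Int) else 1)
            = if ((y :: t).any fun y => y.1 == res) = true then 1 else fl
        rw [List.any_cons, h, Bool.true_or, if_pos rfl, ite_self]
    · have h' : (y.1 == res) = false := by simpa using h
      have hstep : pvAEntryStep res item (acc, fl) y = (acc ++ [y], fl) := by
        simp [pvAEntryStep, h']
      rw [hstep, ih]
      refine Prod.ext ?_ ?_
      · rw [List.map_cons, if_neg h]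
        simp [List.append_assoc]
      · show (if (t.any fun y => y.1 == res) = true then (1 : Int) else fl)
            = if ((y :: t).any fun y => y.1 == res) = true then 1 else fl
        rw [List.any_cons, h', Bool.false_or]


lemma pvAnyDec (K : List String) (r : String) : (K.any fun x => x == r) = decide (r ∈ K) := by
  induction K with
  | nil => simp
  | cons k t ih =>
    by_cases h : r = k
    · simp [List.any_cons, h]
    · simp [List.any_cons, ih, h, Ne.symm h]

-- appending one file only touches the entry of its own key …
lemma pvF_append_ne (xs : List String) (f k : String) (h : k ≠ pvStrip f) :
    pvF (xs ++ [f]) k = pvF xs k := by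
  simp [pvF, List.count_append, List.filter_append, Ne.symm h]

-- … where it bumps the count and appends the file
lemma pvF_append_eq (xs : List String) (f : String) :
    pvF (xs ++ [f]) (pvStrip f)
      = (pvStrip f, ((xs.map pvStrip).count (pvStrip f) : Int) - 1 + 1,
         xs.filter (fun g => pvStrip g == pvStrip f) ++ [f]) := by
  simp [pvF, List.count_append, List.filter_append]

-- one outer step preserves the canonical shape
lemma pvAStep_spec (xs : List String) (f : String) :
    pvAStep (pvLodSpec xs) f = pvLodSpec (xs ++ [f]) := by
  have hmapnew : (xs ++ [f]).map pvStrip = xs.map pvStrip ++ [pvStrip f] := by simp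
  have hKnew : PySem.Set.ofList (xs.map pvStrip ++ [pvStrip f])
      = PySem.Set.add (PySem.Set.ofList (xs.map pvStrip)) (pvStrip f) := by
    rw [PySem.Set.ofList_eq_foldl, PySem.Set.ofList_eq_foldl, List.foldl_append]; rfl
  have hany : ((pvLodSpec xs).any (fun y => y.1 == pvStrip f))
      = decide (pvStrip f ∈ PySem.Set.ofList (xs.map pvStrip)) := by
    simp only [pvLodSpec, List.any_map, Function.comp_def, pvF]
    exact pvAnyDec _ _
  simp only [pvAStep]
  rw [pvA_inner, hany]
  by_cases hmem : pvStrip f ∈ PySem.Set.ofList (xs.map pvStrip)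
  · -- existing key: every matching entry (exactly one per key value) is updated in place
    rw [decide_eq_true hmem]
    have h1 : (if (true = true) then (1 : Int) else 0) = 1 := by simp
    rw [h1, if_neg (by simp), List.nil_append]
    have hadd : PySem.Set.add (PySem.Set.ofList (xs.map pvStrip)) (pvStrip f)
        = PySem.Set.ofList (xs.map pvStrip) := by
      simp [PySem.Set.add, PySem.Set.contains, hmem]
    simp only [pvLodSpec, hmapnew, hKnew, hadd, List.map_map]
    apply List.map_congr_left
    intro k hk
    by_cases hkr : k = pvStrip f
    · subst hkr
      rw [pvF_append_eq]
      simp [Function.comp_apply, pvF]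
    · have hb : (k == pvStrip f) = false := by simp [hkr]
      rw [pvF_append_ne xs f k hkr]
      simp [Function.comp_apply, pvF, hkr]
  · -- new key: nothing matches, a fresh entry is appended
    rw [decide_eq_false hmem]
    have h1 : (if (false = true) then (1 : Int) else 0) = 0 := by simp
    rw [h1, if_pos (by simp), List.nil_append]
    have hadd : PySem.Set.add (PySem.Set.ofList (xs.map pvStrip)) (pvStrip f)
        = PySem.Set.ofList (xs.map pvStrip) ++ [pvStrip f] := by
      simp [PySem.Set.add, PySem.Set.contains, hmem]
    have hnotmem : pvStrip f ∉ xs.map pvStrip := by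
      rwa [PySem.Set.mem_ofList] at hmem
    simp only [pvLodSpec, hmapnew, hKnew, hadd, List.map_map, List.map_append]
    congr 1
    · apply List.map_congr_left
      intro k hk
      have hkr : k ≠ pvStrip f := fun h => hmem (h ▸ hk)
      have hb : (k == pvStrip f) = false := by simp [hkr]
      rw [pvF_append_ne xs f k hkr]
      simp [Function.comp_apply, pvF, hkr]
    · have hcnt : (xs.map pvStrip).count (pvStrip f) = 0 := List.count_eq_zero.2 hnotmem
      have hfil : xs.filter (fun g => pvStrip g == pvStrip f) = [] := by
        rw [List.filter_eq_nil_iff]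
        intro g hg hgf
        exact hnotmem (List.mem_map.2 ⟨g, hg, by simpa using hgf⟩)
      rw [List.map_cons, List.map_nil, pvF_append_eq, hcnt, hfil]
      norm_num

-- A's grouping loop builds exactly the canonical list
lemma pvA_fold (xs : List String) : xs.foldl pvAStep [] = pvLodSpec xs := by
  induction xs using List.reverseRecOn with
  | nil => simp [pvLodSpec]
  | append_singleton t f ih =>
    rw [List.foldl_append, List.foldl_cons, List.foldl_nil, ih, pvAStep_spec]

-- B's counting loop is Counter(map strip)
lemma pvB_fold (xs : List String) :
    xs.foldl pvCntStep PySem.Dict.empty = PySem.Dict.counter (xs.map pvStrip) := by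
  rw [← PySem.Dict.foldl_insert_getD_add_one_eq_counter, List.foldl_map]
  rfl

-- Python's max(ks, key=g) on k0 :: t as a plain running-argmax fold
def pvKPick (g : String → Int) (k0 : String) (t : List String) : String :=
  t.foldl (fun b k => if g b < g k then k else b) k0

lemma pvMaxK_cons (g : String → Int) (t : List String) : ∀ k0,
    PySem.List.max? (k0 :: t) g = some (pvKPick g k0 t) := by
  induction t with
  | nil => intro k0; rfl
  | cons k t ih =>
    intro k0
    have h1 : PySem.List.max? (k0 :: k :: t) g
        = PySem.List.max? ((if g k0 < g k then k else k0) :: t) g := by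
      simp only [PySem.List.max?, List.foldl_cons]
      congr 1
      split <;> rfl
    rw [h1, ih]
    simp only [pvKPick, List.foldl_cons]

-- A's running argmax over canonical entries is pvKPick on the keys
lemma pvEPick_map (xs : List String) (t : List String) : ∀ k0,
    (t.map (pvF xs)).foldl (fun b y => if b.2.1 < y.2.1 then y else b) (pvF xs k0)
      = pvF xs (pvKPick (fun k => ((xs.map pvStrip).count k : Int)) k0 t) := by
  induction t with
  | nil => intro k0; rfl
  | cons k t ih =>
    intro k0
    simp only [List.map_cons, List.foldl_cons, pvKPick, List.foldl_cons] at *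
    by_cases h : ((xs.map pvStrip).count k0 : Int) < ((xs.map pvStrip).count k : Int)
    · have h' : (pvF xs k0).2.1 < (pvF xs k).2.1 := by simp only [pvF]; omega
      rw [if_pos h', if_pos h]; exact ih k
    · have h' : ¬ (pvF xs k0).2.1 < (pvF xs k).2.1 := by simp only [pvF]; omega
      rw [if_neg h', if_neg h]; exact ih k0

lemma pvGet_of_lt (lod : List (String × Int × List String)) (i : Int) (h0 : 0 ≤ i)
    (hlt : i.toNat < lod.length) :
    PySem.List.pyGet? lod i = some (lod[i.toNat]'hlt) := by
  simp only [PySem.List.pyGet?, PySem.List.pyIdx?, if_pos h0]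
  rw [if_pos (by omega)]
  simp [List.getElem?_eq_getElem hlt]

-- A's selection fold: the final index points at the running argmax (first-maximal)
lemma pvSel_aux (rest : List (String × Int × List String)) :
    ∀ (done : List (String × Int × List String)) (mi : String)
      (b : String × Int × List String) (md : Int),
    0 ≤ md →
    (hlt : md.toNat < done.length) →
    done[md.toNat]'hlt = b →
    (0 ≤ (rest.foldl pvASel (mi, b.2.1, md, (done.length : Int))).2.2.1 ∧
     ∃ hlt' : (rest.foldl pvASel (mi, b.2.1, md, (done.length : Int))).2.2.1.toNat
         < (done ++ rest).length,
       ((done ++ rest)[(rest.foldl pvASel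
           (mi, b.2.1, md, (done.length : Int))).2.2.1.toNat]'hlt')
         = rest.foldl (fun b y => if b.2.1 < y.2.1 then y else b) b) := by
  induction rest with
  | nil =>
    intro done mi b md hmd hlt hb
    refine ⟨hmd, by simpa using hlt, ?_⟩
    simpa using hb
  | cons y t ih =>
    intro done mi b md hmd hlt hb
    rw [List.foldl_cons]
    by_cases hgt : y.2.1 > b.2.1
    · have hstep : pvASel (mi, b.2.1, md, (done.length : Int)) y
          = (y.1, y.2.1, ((done.length : Nat) : Int), (((done ++ [y]).length : Nat) : Int)) := by
        simp [pvASel, hgt]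
      rw [hstep]
      have hres := ih (done ++ [y]) y.1 y (((done.length : Nat)) : Int) (by positivity)
        (by simp) (by simp)
      rw [List.append_assoc, List.singleton_append] at hres
      obtain ⟨h0, hlt', heq⟩ := hres
      refine ⟨h0, hlt', ?_⟩
      rw [heq, List.foldl_cons, if_pos hgt]
    · have hstep : pvASel (mi, b.2.1, md, (done.length : Int)) y
          = (mi, b.2.1, md, (((done ++ [y]).length : Nat) : Int)) := by
        simp [pvASel, hgt]
      rw [hstep]
      have hres := ih (done ++ [y]) mi b md hmd
        (by simpa using Nat.lt_succ_of_lt hlt)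
        (by rw [List.getElem_append_left hlt]; exact hb)
      rw [List.append_assoc, List.singleton_append] at hres
      obtain ⟨h0, hlt', heq⟩ := hres
      refine ⟨h0, hlt', ?_⟩
      rw [heq, List.foldl_cons, if_neg hgt]

-- ===== VERDICT (by name: the statement is the Claim_ definition above) =====
theorem ListtoLig_spec : Claim_equal_ListtoLig := by
  intro all_files _ hpre
  simp only [Spec_ListtoLig, ListtoLig, ListtoLig_alt]
  rw [pvA_fold, pvB_fold]
  have hg : (fun k => (PySem.Dict.counter (all_files.map pvStrip)).getD k 0)
      = fun k => ((all_files.map pvStrip).count k : Int) := by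
    funext k; exact PySem.Dict.getD_counter _ _
  rw [PySem.Dict.keys_counter, hg]
  obtain ⟨k0, t, hK⟩ : ∃ k0 t, PySem.Set.ofList (all_files.map pvStrip) = k0 :: t := by
    cases h : PySem.Set.ofList (all_files.map pvStrip) with
    | nil =>
      exfalso
      rcases all_files with _ | ⟨a, r⟩
      · exact hpre rfl
      · have hmem : pvStrip a ∈ PySem.Set.ofList ((a :: r).map pvStrip) :=
          (PySem.Set.mem_ofList _ _).2 (by simp)
        rw [h] at hmem
        simp at hmem
    | cons a b => exact ⟨a, b, rfl⟩
  have hk0 : k0 ∈ all_files.map pvStrip :=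
    (PySem.Set.mem_ofList _ _).1 (by rw [hK]; exact List.mem_cons_self)
  have hc0 : 0 < (all_files.map pvStrip).count k0 := List.count_pos_iff.2 hk0
  simp only [pvLodSpec]
  rw [hK, pvMaxK_cons, List.map_cons, List.foldl_cons]
  have hfirst : pvASel ("", 0, 0, 0) (pvF all_files k0)
      = (if (pvF all_files k0).2.1 > 0 then k0 else "", (pvF all_files k0).2.1, 0, 1) := by
    by_cases h : (pvF all_files k0).2.1 > 0
    · rw [if_pos h]
      simp only [pvASel, if_pos h]
      norm_num
      rfl
    · rw [if_neg h]
      have h0 : (pvF all_files k0).2.1 = 0 := by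
        simp only [pvF] at h ⊢; omega
      simp only [pvASel, h0]
      norm_num
  rw [hfirst]
  have haux := pvSel_aux (t.map (pvF all_files)) [pvF all_files k0]
      (if (pvF all_files k0).2.1 > 0 then k0 else "") (pvF all_files k0) 0 le_rfl (by simp) (by simp)
  simp only [List.length_singleton, Nat.cast_one, List.singleton_append] at haux
  obtain ⟨h0, hlt', heq⟩ := haux
  rw [pvGet_of_lt _ _ h0 hlt']
  simp only [Option.map_some, Option.getD_some]
  rw [heq, pvEPick_map]
  rfl
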